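-- pv_equiv track=rewrite | github.com/Augustin007/usefulpy | build/lib/usefulpy/formatting.py | Fix_stolong
-- ===== SOURCE A (Python) =====
-- long_s = 'ſ'
--
-- def Fix_stolong(text):
--     '''replace certain instances of s with long s according to older spelling rules'''
--     if text == '': return ''
--     if 's' not in text: return text
--     textm1 = ' '+text[:-1]
--     textp1 = text[1:]+' '
--     ntext = ''
--     for prevchar, char, nextchar in zip(textm1, text, textp1):
--         if char == 's':
--             if prevchar in ('sſf'):
--                 ntext+=char
--             elif nextchar in '?!,–—()";:kfb_ ':
--                 ntext += char
--             else:
--                 ntext += long_s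
--             continue
--         ntext += char
--     return ntext
-- ===== SOURCE B (Python) =====
-- import re
--
-- long_s = 'ſ'
--
-- def Fix_stolong(text):
--     '''replace certain instances of s with long s according to older spelling rules'''
--     return re.sub('(?<![sſf])s(?![?!,–—()";:kfb_ ]|\\Z)', long_s, text)
-- ===== Notes on version B (the rewrite author's own statement) =====
-- stated objective: idiomatic
-- what changed: Replaces the three shifted string copies zipped in an explicit accumulating loop by a single re.sub with lookbehind/lookahead classes that encode the keep rules (\Z standing in for the trailing-space sentinel).
import Mathlib
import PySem

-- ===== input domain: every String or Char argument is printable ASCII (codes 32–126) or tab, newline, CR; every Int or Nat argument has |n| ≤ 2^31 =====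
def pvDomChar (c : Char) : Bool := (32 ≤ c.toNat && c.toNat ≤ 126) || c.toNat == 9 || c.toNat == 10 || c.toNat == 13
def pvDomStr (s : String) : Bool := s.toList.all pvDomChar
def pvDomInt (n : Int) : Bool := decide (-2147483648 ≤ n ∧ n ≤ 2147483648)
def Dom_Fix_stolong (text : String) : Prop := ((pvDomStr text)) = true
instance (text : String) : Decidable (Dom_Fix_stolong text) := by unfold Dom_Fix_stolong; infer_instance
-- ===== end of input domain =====

-- B replaces A's three shifted string copies + zip loop by one regex substitution
-- (ported as a single left-to-right scan with lookbehind/lookahead on the original);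
-- objective: idiomatic/simpler.

-- ===== PORT A =====
-- A's sets, as string literals in the Python: prevchar in 'sſf', nextchar in '?!,–—()";:kfb_ '
def pvPrevA : List Char := ['s', 'ſ', 'f']
def pvKeepA : List Char := ['?', '!', ',', '–', '—', '(', ')', '"', ';', ':', 'k', 'f', 'b', '_', ' ']

-- one step of A's loop body over a (prevchar, (char, nextchar)) triple
def pvStepA (ntext : List Char) (t : Char × Char × Char) : List Char :=
  if t.2.1 = 's' then
    if pvPrevA.contains t.1 then ntext ++ [t.2.1]
    else if pvKeepA.contains t.2.2 then ntext ++ [t.2.1]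
    else ntext ++ ['ſ']
  else ntext ++ [t.2.1]

def Fix_stolong (text : String) : String :=
  if text = "" then "" else
  if ¬ (text.toList.contains 's') then text else
  let l := text.toList
  let textm1 := ' ' :: l.dropLast          -- ' ' + text[:-1]
  let textp1 := l.drop 1 ++ [' ']          -- text[1:] + ' '
  String.ofList ((textm1.zip (l.zip textp1)).foldl pvStepA [])

-- ===== PORT B =====
-- B is re.sub(r'(?<![sſf])s(?![?!,–—()";:kfb_ ]|\Z)', 'ſ', text): a single scan of
-- the original string; the lookarounds are evaluated on the original characters.
def pvBehindB : List Char := ['s', 'ſ', 'f']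
def pvAheadB : List Char := ['?', '!', ',', '–', '—', '(', ')', '"', ';', ':', 'k', 'f', 'b', '_', ' ']

-- negative lookahead '(?![class]|\Z)': succeeds iff a next char exists and is not in the class
def pvAheadOk : List Char → Bool
  | [] => false
  | n :: _ => !(pvAheadB.contains n)

-- the regex engine's scan; `prev` is the char before the current position (none at the start)
def pvScanB (prev : Option Char) : List Char → List Char
  | [] => []
  | c :: rest =>
    (if c = 's' && !(match prev with | none => false | some p => pvBehindB.contains p)
        && pvAheadOk rest then 'ſ' else c) :: pvScanB (some c) rest

def Fix_stolong_alt (text : String) : String := String.ofList (pvScanB none text.toList)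

-- ===== PRECONDITION & SPEC =====
def Spec_Fix_stolong (text : String) (out : String) : Prop := out = Fix_stolong_alt text
instance (text : String) (out : String) : Decidable (Spec_Fix_stolong text out) := by unfold Spec_Fix_stolong; infer_instance

-- ===== CLAIM (what is proved, stated in full; the proofs are below) =====
def Claim_equal_Fix_stolong : Prop := ∀ (text : String), Dom_Fix_stolong text → Spec_Fix_stolong text (Fix_stolong text)

-- ===== LEMMAS AND PROOFS =====

-- A's append-only foldl is the map of its per-triple choice
theorem pvFoldA_eq_map (l : List (Char × Char × Char)) (acc : List Char) :
    l.foldl pvStepA acc = acc ++ l.map (fun t =>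
      if t.2.1 = 's' then
        if pvPrevA.contains t.1 then t.2.1
        else if pvKeepA.contains t.2.2 then t.2.1
        else 'ſ'
      else t.2.1) := by
  induction l generalizing acc with
  | nil => simp
  | cons h t ih =>
    simp only [List.foldl_cons, List.map_cons, ih]
    unfold pvStepA
    split_ifs <;> simp

-- core: A's zip-of-shifted-copies pass equals B's scan, for any previous char p
theorem pvMain (l : List Char) (p : Char) :
    ((p :: l.dropLast).zip (l.zip (l.drop 1 ++ [' ']))).map (fun t =>
      if t.2.1 = 's' then
        if pvPrevA.contains t.1 then t.2.1
        else if pvKeepA.contains t.2.2 then t.2.1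
        else 'ſ'
      else t.2.1) = pvScanB (some p) l := by
  induction l generalizing p with
  | nil => simp [pvScanB]
  | cons c rest ih =>
    cases rest with
    | nil =>
      simp only [pvScanB, List.dropLast, List.drop, List.nil_append, List.zip_cons_cons,
        List.zip_nil_right, List.map_cons, List.map_nil, pvAheadOk]
      by_cases hc : c = 's' <;> simp [hc, pvPrevA, pvBehindB, pvKeepA]
    | cons n rest' =>
      have h1 : List.drop 1 (c :: n :: rest') = n :: rest' := rfl
      have h2 : (c :: n :: rest').dropLast = c :: (n :: rest').dropLast := rfl
      have h3 : List.drop 1 (n :: rest') = rest' := rfl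
      have ihc := ih c
      rw [h3] at ihc
      rw [h1, h2]
      rw [show (n :: rest') ++ [' '] = (n :: (rest' ++ [' '])) from rfl]
      rw [List.zip_cons_cons, List.zip_cons_cons, List.map_cons, ihc]
      show _ = pvScanB (some p) (c :: n :: rest')
      unfold pvScanB
      congr 1
      have hPB : pvPrevA = pvBehindB := rfl
      have hKB : pvKeepA = pvAheadB := rfl
      by_cases hc : c = 's'
      · by_cases hp : p ∈ pvBehindB <;> by_cases hn : n ∈ pvAheadB <;>
          simp [pvAheadOk, hc, hp, hn, hPB, hKB]
      · simp [pvAheadOk, hc]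

-- if the text has no 's', B's scan is the identity
theorem pvScanB_no_s (l : List Char) (p : Option Char) (h : 's' ∉ l) :
    pvScanB p l = l := by
  induction l generalizing p with
  | nil => rfl
  | cons c rest ih =>
    have hc : c ≠ 's' := fun hcc => h (hcc ▸ List.mem_cons_self)
    have : ¬ (c = 's') := fun hcc => hc hcc
    simp only [pvScanB, ih _ (fun hm => h (List.mem_cons_of_mem _ hm))]
    simp [this]

-- ===== VERDICT (by name: the statement is the Claim_ definition above) =====
theorem Fix_stolong_spec : Claim_equal_Fix_stolong := by
  intro text _
  unfold Spec_Fix_stolong Fix_stolong Fix_stolong_alt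
  by_cases he : text = ""
  · subst he; simp [pvScanB]
  · simp only [he, if_false]
    by_cases hs : text.toList.contains 's'
    · simp only [hs, not_true, if_false]
      rw [pvFoldA_eq_map, List.nil_append]
      cases htl : text.toList with
      | nil =>
        exact absurd (by simpa using congrArg String.ofList htl) he
      | cons c rest =>
        show String.ofList (((' ' :: (c :: rest).dropLast).zip ((c :: rest).zip (List.drop 1 (c :: rest) ++ [' ']))).map _) = _
        rw [pvMain (c :: rest) ' ']
        rfl
    · simp only [hs, Bool.not_eq_true, if_pos]
      rw [pvScanB_no_s _ _ (by simpa using hs)]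
      simp
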